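-- pv_equiv track=rewrite | github.com/vitte-lang/vitte | compiler/bench/src/data/generators/tools/sample_corpus.py | split_globs
-- ===== SOURCE A (Python) =====
-- from typing import Dict, Iterable, List, Optional, Sequence, Tuple
--
-- def split_globs(items: List[str]) -> List[str]:
--     out: List[str] = []
--     for it in items:
--         if not it:
--             continue
--         for p in it.split(","):
--             p = p.strip()
--             if p:
--                 out.append(p)
--     return out
-- ===== SOURCE B (Python) =====
-- def split_globs(items):
--     # Flatten all truthy items into one comma-joined string, split once, strip, keep non-empty.
--     joined = ",".join(x for x in items if x)
--     return [p for p in (s.strip() for s in joined.split(",")) if p]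
-- ===== Notes on version B (the rewrite author's own statement) =====
-- stated objective: alternative
-- what changed: B replaces A's nested per-item split loop by flattening all truthy items into one comma-joined string, doing a single split on it, then stripping and filtering in one comprehension pass.
import Mathlib
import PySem

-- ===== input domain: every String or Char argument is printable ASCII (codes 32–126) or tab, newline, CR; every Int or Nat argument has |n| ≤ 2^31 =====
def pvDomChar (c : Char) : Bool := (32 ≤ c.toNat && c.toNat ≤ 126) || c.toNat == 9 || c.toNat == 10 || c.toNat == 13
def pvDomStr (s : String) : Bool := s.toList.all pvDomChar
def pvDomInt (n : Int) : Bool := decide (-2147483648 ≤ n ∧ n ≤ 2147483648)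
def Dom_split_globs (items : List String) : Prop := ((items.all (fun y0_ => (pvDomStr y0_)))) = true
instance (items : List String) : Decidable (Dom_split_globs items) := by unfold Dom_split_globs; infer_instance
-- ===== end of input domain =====

-- B replaces A's nested per-item loop by joining all truthy items with "," and doing one split;
-- a different decomposition (alternative), not claimed faster.

-- ===== PORT A =====
-- out = []; for it in items: if not it: continue; for p in it.split(","): p = p.strip(); if p: out.append(p)
def split_globs (items : List String) : List String :=
  items.foldl (fun out it =>
    if it.toList = [] then out
    else (PySem.Chars.splitOn it.toList [',']).foldl (fun out p =>
      let q := PySem.Chars.strip p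
      if q = [] then out else out ++ [String.ofList q]) out) []

-- ===== PORT B =====
-- joined = ",".join(x for x in items if x); return [p for p in (s.strip() for s in joined.split(",")) if p]
def split_globs_alt (items : List String) : List String :=
  let joined := PySem.Chars.join [','] ((items.filter (fun x => !x.toList.isEmpty)).map String.toList)
  (((PySem.Chars.splitOn joined [',']).map PySem.Chars.strip).filter (fun p => !p.isEmpty)).map String.ofList

-- ===== PRECONDITION & SPEC =====
def Spec_split_globs (items : List String) (out : List String) : Prop := out = split_globs_alt items
instance (items : List String) (out : List String) : Decidable (Spec_split_globs items out) := by unfold Spec_split_globs; infer_instance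

-- ===== CLAIM (what is proved, stated in full; the proofs are below) =====
def Claim_equal_split_globs : Prop := ∀ (items : List String), Dom_split_globs items → Spec_split_globs items (split_globs items)

-- ===== LEMMAS AND PROOFS =====

-- structural single-comma split, characterising PySem.Chars.splitOn · [',']
def split1 : List Char → List (List Char)
  | [] => [[]]
  | c :: r => if c = ',' then [] :: split1 r else (split1 r).modifyHead (c :: ·)

theorem split1_ne_nil (l : List Char) : split1 l ≠ [] := by
  induction l with
  | nil => simp [split1]
  | cons c r ih =>
    simp only [split1]
    split_ifs
    · simp
    · cases h : split1 r with
      | nil => exact absurd h ih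
      | cons p ps => simp [List.modifyHead]

theorem go_eq (l : List Char) : ∀ (fuel : Nat) (cur : List Char) (acc : List (List Char)),
    l.length ≤ fuel →
    PySem.Chars.splitOn.go [','] fuel l cur acc
      = acc.reverse ++ (split1 l).modifyHead (cur.reverse ++ ·) := by
  induction l with
  | nil =>
    intro fuel cur acc _
    cases fuel <;> simp [PySem.Chars.splitOn.go, split1, List.modifyHead]
  | cons c r ih =>
    intro fuel cur acc hle
    cases fuel with
    | zero => simp at hle
    | succ n =>
      simp only [PySem.Chars.splitOn.go]
      by_cases hc : c = ','
      · subst hc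
        rw [if_pos (by simp [List.isPrefixOf])]
        rw [show List.drop [','].length (',' :: r) = r from rfl]
        rw [ih n [] (cur.reverse :: acc) (by simpa using Nat.le_of_succ_le_succ hle)]
        cases h : split1 r with
        | nil => exact absurd h (split1_ne_nil r)
        | cons p ps => simp [split1, h, List.modifyHead]
      · rw [if_neg (by intro hpre; simp [List.isPrefixOf] at hpre; exact hc hpre.symm)]
        rw [ih n (c :: cur) acc (by simpa using Nat.le_of_succ_le_succ hle)]
        simp only [split1, if_neg hc]
        cases h : split1 r with
        | nil => exact absurd h (split1_ne_nil r)
        | cons p ps => simp [List.modifyHead]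

theorem splitOn_comma (s : List Char) : PySem.Chars.splitOn s [','] = split1 s := by
  unfold PySem.Chars.splitOn
  rw [go_eq s (s.length + 1) [] [] (Nat.le_succ _)]
  cases h : split1 s with
  | nil => exact absurd h (split1_ne_nil s)
  | cons p ps => simp [List.modifyHead]

-- the post-processing applied to a list of pieces
def G (ps : List (List Char)) : List String :=
  ((ps.map PySem.Chars.strip).filter (fun p => !p.isEmpty)).map String.ofList

theorem G_append (a b : List (List Char)) : G (a ++ b) = G a ++ G b := by
  simp [G]

theorem G_nil_piece : G [[]] = [] := by decide

theorem split1_append (a b : List Char) :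
    split1 (a ++ ',' :: b) = split1 a ++ split1 b := by
  induction a with
  | nil => simp [split1]
  | cons c a ih =>
    by_cases hc : c = ','
    · subst hc; simp [split1, ih]
    · simp only [List.cons_append, split1, if_neg hc, ih]
      cases h : split1 a with
      | nil => exact absurd h (split1_ne_nil a)
      | cons p ps => simp [List.modifyHead]

theorem split1_join (ts : List (List Char)) :
    G (split1 (PySem.Chars.join [','] ts)) = ts.flatMap (fun t => G (split1 t)) := by
  induction ts with
  | nil => simp [PySem.Chars.join, List.intercalate, split1, G_nil_piece]
  | cons x ts ih =>
    cases ts with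
    | nil => simp [PySem.Chars.join, List.intercalate]
    | cons y ys =>
      have hj : PySem.Chars.join [','] (x :: y :: ys)
          = x ++ ',' :: PySem.Chars.join [','] (y :: ys) := by
        simp [PySem.Chars.join, List.intercalate, List.intersperse]
      rw [hj, split1_append, G_append, ih]
      simp

theorem inner_loop (L : List (List Char)) : ∀ (out : List String),
    L.foldl (fun out p =>
      let q := PySem.Chars.strip p
      if q = [] then out else out ++ [String.ofList q]) out = out ++ G L := by
  induction L with
  | nil => intro out; simp [G]
  | cons p L ih =>
    intro out
    simp only [List.foldl_cons]
    by_cases h : PySem.Chars.strip p = []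
    · simp only [h, ih]
      simp [G, h]
    · simp only [if_neg h, ih]
      simp [G, h]

theorem a_flatMap (items : List String) : ∀ (out : List String),
    items.foldl (fun out it =>
      if it.toList = [] then out
      else (PySem.Chars.splitOn it.toList [',']).foldl (fun out p =>
        let q := PySem.Chars.strip p
        if q = [] then out else out ++ [String.ofList q]) out) out
    = out ++ items.flatMap (fun it => G (split1 it.toList)) := by
  induction items with
  | nil => intro out; simp
  | cons it items ih =>
    intro out
    simp only [List.foldl_cons, List.flatMap_cons]
    by_cases h : it.toList = []
    · rw [if_pos h, ih, h]
      simp [split1, G_nil_piece]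
    · rw [if_neg h, splitOn_comma, inner_loop, ih, List.append_assoc]

theorem flatMap_truthy (items : List String) :
    items.flatMap (fun it => G (split1 it.toList))
      = ((items.filter (fun x => !x.toList.isEmpty)).map String.toList).flatMap
          (fun t => G (split1 t)) := by
  induction items with
  | nil => rfl
  | cons it items ih =>
    by_cases h : it.toList = []
    · simp [h, ih, split1, G_nil_piece]
    · simp [h, ih]

-- ===== VERDICT (by name: the statement is the Claim_ definition above) =====
theorem split_globs_spec : Claim_equal_split_globs := by
  intro items _
  unfold Spec_split_globs split_globs split_globs_alt
  rw [a_flatMap items []]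
  simp only [List.nil_append, splitOn_comma]
  show items.flatMap (fun it => G (split1 it.toList))
      = G (split1 (PySem.Chars.join [','] ((items.filter (fun x => !x.toList.isEmpty)).map String.toList)))
  rw [split1_join, flatMap_truthy]
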